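-- pv_equiv track=rewrite | github.com/dmtwong/Brush_up_2 | Python/Interviewbit/hashing/has_AnIncrementProblem.py | solve
-- ===== SOURCE A (Python) =====
-- def solve(A):
--     unique = set()
--     result = []
--     n_A = len(A)
--     for i in range(n_A):
--         cur_i = A[i]
--         if cur_i in unique:
--             # unique.add(cur_i)
--             # result.append(cur_i)
--         # else:
--             ix_i = result.index(cur_i)
--             result[ix_i] += 1
--             unique.add(result[ix_i])
--         unique.add(cur_i)
--         result.append(cur_i)
--     return result
-- ===== SOURCE B (Python) =====
-- def _insort(h, i):
--     # insert i into ascending list h, after all elements <= i (scan from the right)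
--     k = len(h)
--     while k > 0 and i < h[k-1]:
--         k -= 1
--     h.insert(k, i)
--
-- def solve(A):
--     res = []
--     pos = {}  # value -> ascending list of the indices of res currently holding that value
--     for x in A:
--         h = pos.get(x)
--         if h:
--             i = h.pop(0)            # first (leftmost) occurrence of x in res
--             res[i] += 1
--             _insort(pos.setdefault(res[i], []), i)
--         pos.setdefault(x, []).append(len(res))
--         res.append(x)
--     return res
-- ===== Notes on version B (the rewrite author's own statement) =====
-- stated objective: faster
-- what changed: Replaces the O(n) result.index scan (and the membership set) with a dict mapping each value to the ascending list of indices currently holding it, so the first occurrence is found by a dict lookup; indices are moved between the per-value lists as values are incremented.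
import Mathlib
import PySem

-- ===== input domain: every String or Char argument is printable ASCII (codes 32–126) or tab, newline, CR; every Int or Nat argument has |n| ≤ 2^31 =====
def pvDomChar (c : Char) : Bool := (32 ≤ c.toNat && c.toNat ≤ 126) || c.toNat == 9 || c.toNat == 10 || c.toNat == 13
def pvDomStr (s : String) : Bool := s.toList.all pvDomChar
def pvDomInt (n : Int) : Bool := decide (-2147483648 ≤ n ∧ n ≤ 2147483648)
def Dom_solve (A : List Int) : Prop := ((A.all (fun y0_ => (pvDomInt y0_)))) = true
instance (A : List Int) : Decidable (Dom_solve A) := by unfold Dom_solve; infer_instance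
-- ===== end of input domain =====

-- B replaces A's O(n) result.index scan by a dict value → ascending list of indices; objective: faster.

-- ===== PORT A =====
-- one iteration of A's loop body, state = (unique, result)
def stepA (s : PySem.Set Int × List Int) (cur : Int) : PySem.Set Int × List Int :=
  let s' :=
    if PySem.Set.contains s.1 cur then
      match PySem.List.index? s.2 cur with
      | some ix =>
          let w := s.2.getD ix 0 + 1
          (PySem.Set.add s.1 w, s.2.set ix w)
      | none => s  -- Python would raise ValueError here; proved unreachable (cur ∈ unique → cur ∈ result)
    else s
  (PySem.Set.add s'.1 cur, s'.2 ++ [cur])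

def solve (A : List Int) : List Int :=
  ((PySem.List.pyRange 0 (A.length : Int) 1).foldl
      (fun s i => stepA s (PySem.List.pyGetD A i 0)) (PySem.Set.empty, [])).2

-- ===== PORT B =====
-- _insort: insert i into the ascending list h, scanning from the right
def insortDesc (i : Nat) : List Nat → List Nat
  | [] => [i]
  | y :: ys => if i < y then y :: insortDesc i ys else i :: y :: ys

def insort (i : Nat) (h : List Nat) : List Nat := (insortDesc i h.reverse).reverse

-- one iteration of B's loop body, state = (res, pos)
def stepB (s : List Int × PySem.Dict Int (List Nat)) (x : Int) : List Int × PySem.Dict Int (List Nat) :=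
  let s' :=
    match PySem.Dict.getD s.2 x [] with      -- pos.get(x); None and [] are both falsy
    | [] => s
    | i :: t =>
        let w := s.1.getD i 0 + 1
        let pos' := PySem.Dict.insert s.2 x t                 -- h.pop(0)
        (s.1.set i w, PySem.Dict.insert pos' w (insort i (PySem.Dict.getD pos' w [])))
  (s'.1 ++ [x], PySem.Dict.insert s'.2 x (PySem.Dict.getD s'.2 x [] ++ [s'.1.length]))

def solve_alt (A : List Int) : List Int :=
  (A.foldl stepB ([], PySem.Dict.empty)).1

-- ===== PRECONDITION & SPEC =====
def Spec_solve (A : List Int) (out : List Int) : Prop := out = solve_alt A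
instance (A : List Int) (out : List Int) : Decidable (Spec_solve A out) := by unfold Spec_solve; infer_instance

-- ===== CLAIM (what is proved, stated in full; the proofs are below) =====
def Claim_equal_solve : Prop := ∀ (A : List Int), Dom_solve A → Spec_solve A (solve A)

-- ===== LEMMAS AND PROOFS =====

-- the ascending list of the indices of res currently holding value v
def posns (res : List Int) (v : Int) : List Nat :=
  (List.range res.length).filter (fun j => res.getD j 0 == v)

theorem mem_posns {res : List Int} {v : Int} {j : Nat} :
    j ∈ posns res v ↔ j < res.length ∧ res.getD j 0 = v := by
  simp [posns, List.mem_filter, List.mem_range]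

theorem posns_append_singleton (res : List Int) (c v : Int) :
    posns (res ++ [c]) v = posns res v ++ (if c = v then [res.length] else []) := by
  unfold posns
  rw [List.length_append, List.length_singleton, List.range_succ, List.filter_append]
  congr 1
  · apply List.filter_congr
    intro j hj
    rw [List.mem_range] at hj
    rw [List.getD_append _ _ _ _ hj]
  · simp
    split <;> simp_all

theorem pairwise_posns (res : List Int) (v : Int) : (posns res v).Pairwise (· < ·) := by
  exact (List.pairwise_lt_range).filter _

theorem posns_min {res : List Int} {v : Int} {i : Nat} {t : List Nat}
    (h : posns res v = i :: t) : ∀ j, j < i → res.getD j 0 ≠ v := by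
  intro j hj hv
  have hjm : j ∈ posns res v := mem_posns.mpr ⟨lt_of_lt_of_le hj (by
      have := mem_posns.mp (h ▸ List.mem_cons_self (l := t)); omega), hv⟩
  rw [h] at hjm
  rcases List.mem_cons.mp hjm with rfl | hjt
  · omega
  · have := pairwise_posns res v
    rw [h] at this
    exact absurd (List.rel_of_pairwise_cons this hjt) (by omega)

theorem index?_of_minimal : ∀ {res : List Int} {v : Int} {i : Nat},
    i < res.length → res.getD i 0 = v → (∀ j, j < i → res.getD j 0 ≠ v) →
    PySem.List.index? res v = some i := by
  intro res
  induction res with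
  | nil => intro v i hi; simp at hi
  | cons x xs ih =>
    intro v i hi hv hmin
    by_cases hx : x = v
    · subst hx
      have hi0 : i = 0 := by
        by_contra h0
        exact hmin 0 (by omega) (by simp)
      subst hi0
      exact PySem.List.index?_cons_self _ _
    · match i with
      | 0 => simp at hv; exact absurd hv hx
      | i' + 1 =>
        rw [PySem.List.index?_cons_of_ne _ hx,
          ih (by simpa using hi) (by simpa using hv)
            (fun j hj => by simpa using hmin (j + 1) (by omega))]
        rfl

theorem index?_of_posns_cons {res : List Int} {v : Int} {i : Nat} {t : List Nat}
    (h : posns res v = i :: t) : PySem.List.index? res v = some i := by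
  have hm := mem_posns.mp (h ▸ List.mem_cons_self (l := t))
  exact index?_of_minimal hm.1 hm.2 (posns_min h)

theorem getD_set (res : List Int) (i j : Nat) (w : Int) (hi : i < res.length) :
    (res.set i w).getD j 0 = if j = i then w else res.getD j 0 := by
  rcases eq_or_ne j i with rfl | h
  · simp [List.getD_eq_getElem?_getD, List.getElem?_set_self, hi]
  · simp [List.getD_eq_getElem?_getD, List.getElem?_set_ne (by omega : i ≠ j), h]

theorem posns_set_ne {res : List Int} {v w : Int} {i : Nat}
    (hi : i < res.length) (hvw : v ≠ w) :
    posns (res.set i w) v = (posns res v).filter (fun j => j ≠ i) := by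
  unfold posns
  rw [List.length_set, List.filter_filter]
  apply List.filter_congr
  intro j hj
  rw [getD_set res i j w hi]
  rcases eq_or_ne j i with rfl | h
  · simp [Ne.symm hvw]
  · simp [h]

theorem mem_insortDesc {i j : Nat} : ∀ {l : List Nat}, j ∈ insortDesc i l ↔ j = i ∨ j ∈ l := by
  intro l
  induction l with
  | nil => simp [insortDesc]
  | cons y ys ih =>
    simp only [insortDesc]
    split <;> simp [ih] <;> tauto

theorem pairwise_insortDesc {i : Nat} : ∀ {l : List Nat}, l.Pairwise (· > ·) → i ∉ l →
    (insortDesc i l).Pairwise (· > ·) := by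
  intro l
  induction l with
  | nil => intro _ _; simp [insortDesc]
  | cons y ys ih =>
    intro hp hni
    rw [List.pairwise_cons] at hp
    simp only [insortDesc]
    split
    · rename_i hiy
      rw [List.pairwise_cons]
      refine ⟨fun j hj => ?_, ih hp.2 (fun h => hni (List.mem_cons_of_mem _ h))⟩
      rcases mem_insortDesc.mp hj with rfl | hj'
      · exact hiy
      · exact hp.1 j hj'
    · rename_i hiy
      have hyi : y < i := by
        rcases eq_or_ne i y with rfl | hne
        · exact absurd List.mem_cons_self hni
        · omega
      rw [List.pairwise_cons]
      exact ⟨fun j hj => by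
        rcases List.mem_cons.mp hj with rfl | hj'
        · exact hyi
        · exact lt_trans (hp.1 j hj') hyi,
        List.pairwise_cons.mpr hp⟩

theorem mem_insort {i j : Nat} {l : List Nat} : j ∈ insort i l ↔ j = i ∨ j ∈ l := by
  simp [insort, mem_insortDesc]

theorem pairwise_insort {i : Nat} {l : List Nat} (hp : l.Pairwise (· < ·)) (hni : i ∉ l) :
    (insort i l).Pairwise (· < ·) := by
  unfold insort
  rw [List.pairwise_reverse]
  exact pairwise_insortDesc (List.pairwise_reverse.mpr hp) (by simpa using hni)

theorem eq_of_pairwise_lt_of_mem_iff {l₁ l₂ : List Nat}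
    (h₁ : l₁.Pairwise (· < ·)) (h₂ : l₂.Pairwise (· < ·))
    (hm : ∀ j, j ∈ l₁ ↔ j ∈ l₂) : l₁ = l₂ := by
  have n₁ : l₁.Nodup := h₁.imp (fun h => Nat.ne_of_lt h)
  have n₂ : l₂.Nodup := h₂.imp (fun h => Nat.ne_of_lt h)
  exact ((List.perm_ext_iff_of_nodup n₁ n₂).mpr hm).eq_of_pairwise
    (fun a b _ _ h h' => le_antisymm h h') (h₁.imp le_of_lt) (h₂.imp le_of_lt)

theorem posns_set_self {res : List Int} {w : Int} {i : Nat}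
    (hi : i < res.length) (hne : res.getD i 0 ≠ w) :
    posns (res.set i w) w = insort i (posns res w) := by
  have hni : i ∉ posns res w := fun h => hne (mem_posns.mp h).2
  apply eq_of_pairwise_lt_of_mem_iff (pairwise_posns _ _)
    (pairwise_insort (pairwise_posns _ _) hni)
  intro j
  rw [mem_insort, mem_posns, mem_posns, List.length_set, getD_set res i j w hi]
  rcases eq_or_ne j i with rfl | h
  · simp [hi]
  · simp [h]

theorem filter_ne_of_not_mem {l : List Nat} {i : Nat} (h : i ∉ l) :
    l.filter (fun j => j ≠ i) = l :=
  List.filter_eq_self.mpr (fun a ha => by simp; rintro rfl; exact h ha)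

theorem insort_ne_nil {i : Nat} {l : List Nat} : insort i l ≠ [] :=
  List.ne_nil_of_mem (mem_insort.mpr (Or.inl rfl))

theorem main_fold (l : List Int) :
    ∀ (u : PySem.Set Int) (res : List Int) (pos : PySem.Dict Int (List Nat)),
      (∀ v : Int, v ∈ u ↔ posns res v ≠ []) →
      (∀ v : Int, PySem.Dict.getD pos v [] = posns res v) →
      (l.foldl stepA (u, res)).2 = (l.foldl stepB (res, pos)).1 := by
  induction l with
  | nil => intro u res pos _ _; rfl
  | cons c l ih =>
    intro u res pos hu hpos
    rw [List.foldl_cons, List.foldl_cons]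
    rcases hc : posns res c with _ | ⟨i, t⟩
    · -- c not in result: both sides just append c
      have hcu : PySem.Set.contains u c = false := by
        rw [Bool.eq_false_iff]
        simp only [ne_eq, PySem.Set.contains_iff]
        exact fun h => (hu c).mp h hc
      have hnc : c ∉ u := fun h => (hu c).mp h hc
      have hA : stepA (u, res) c = (PySem.Set.add u c, res ++ [c]) := by
        simp [stepA, hnc]
      have hB : stepB (res, pos) c
          = (res ++ [c], PySem.Dict.insert pos c (posns res c ++ [res.length])) := by
        simp [stepB, hpos c, hc]
      rw [hA, hB]
      apply ih
      · intro v
        rw [PySem.Set.mem_add, hu v, posns_append_singleton]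
        rcases eq_or_ne v c with rfl | h
        · simp
        · simp [h, Ne.symm h]
      · intro v
        rw [PySem.Dict.getD_insert, posns_append_singleton]
        rcases eq_or_ne v c with rfl | h
        · simp [hc]
        · simp [h, Ne.symm h, hpos v]
    · -- c occurs in result; i is its first index
      have hmem := mem_posns.mp (hc ▸ List.mem_cons_self (l := t))
      have hi : i < res.length := hmem.1
      have hcv : res.getD i 0 = c := hmem.2
      have hcu : PySem.Set.contains u c = true := by
        simp only [PySem.Set.contains_iff]
        exact (hu c).mpr (by rw [hc]; simp)
      have hcm : c ∈ u := (hu c).mpr (by rw [hc]; simp)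
      have hidx : List.idxOf? c res = some i := by
        have h0 := index?_of_posns_cons hc
        rwa [PySem.List.index?_eq_idxOf?] at h0
      have hint : i ∉ t := by
        have := pairwise_posns res c
        rw [hc, List.pairwise_cons] at this
        exact fun h => absurd (this.1 i h) (by omega)
      have hA : stepA (u, res) c
          = (PySem.Set.add (PySem.Set.add u (c + 1)) c, res.set i (c + 1) ++ [c]) := by
        have hcv' : res[i]?.getD 0 = c := by rwa [List.getD_eq_getElem?_getD] at hcv
        simp [stepA, hcm, hidx, hcv']
      have hB : stepB (res, pos) c
          = (res.set i (c + 1) ++ [c],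
             PySem.Dict.insert
               (PySem.Dict.insert (PySem.Dict.insert pos c t) (c + 1)
                 (insort i (posns res (c + 1))))
               c (t ++ [res.length])) := by
        simp only [stepB, hpos c, hc, hcv]
        have h1 : PySem.Dict.getD (PySem.Dict.insert pos c t) (c + 1) [] = posns res (c + 1) := by
          rw [PySem.Dict.getD_insert]
          simp [hpos (c + 1)]
        rw [h1]
        have h2 : PySem.Dict.getD
            (PySem.Dict.insert (PySem.Dict.insert pos c t) (c + 1) (insort i (posns res (c + 1))))
            c [] = t := by
          rw [PySem.Dict.getD_insert]
          simp [PySem.Dict.getD_insert]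
        rw [h2, List.length_set]
      rw [hA, hB]
      apply ih
      · intro v
        rw [PySem.Set.mem_add, PySem.Set.mem_add, hu v, posns_append_singleton]
        rcases eq_or_ne v c with rfl | hvc
        · simp
        · rcases eq_or_ne v (c + 1) with rfl | hvw
          · rw [posns_set_self hi (by omega : res.getD i 0 ≠ c + 1)]
            simp [insort_ne_nil, hvc, Ne.symm hvc]
          · rw [posns_set_ne hi hvw, filter_ne_of_not_mem
              (fun h => hvc ((mem_posns.mp h).2.symm.trans hcv))]
            simp [hvc, hvw, Ne.symm hvc]
      · intro v
        rw [PySem.Dict.getD_insert, posns_append_singleton]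
        rcases eq_or_ne v c with rfl | hvc
        · rw [posns_set_ne hi (by omega)]
          simp [hc]
          exact (List.filter_eq_self.mpr fun a ha => by
            simp only [decide_not, Bool.not_eq_eq_eq_not, Bool.not_true, decide_eq_false_iff_not]
            rintro rfl
            exact hint ha).symm
        · rw [PySem.Dict.getD_insert]
          rcases eq_or_ne v (c + 1) with rfl | hvw
          · rw [posns_set_self hi (by omega : res.getD i 0 ≠ c + 1)]
            simp [Ne.symm hvc]
          · rw [PySem.Dict.getD_insert, posns_set_ne hi hvw]
            simp only [if_neg hvc, if_neg hvw, hpos v]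
            rw [filter_ne_of_not_mem (fun h => hvc ((mem_posns.mp h).2.symm.trans hcv))]
            simp [Ne.symm hvc]

-- ===== VERDICT (by name: the statement is the Claim_ definition above) =====
theorem solve_spec : Claim_equal_solve := by
  intro A _
  show solve A = solve_alt A
  unfold solve solve_alt
  rw [PySem.List.foldl_pyRange_zero_pyGetD' A 0 stepA (PySem.Set.empty, [])]
  exact main_fold A PySem.Set.empty [] PySem.Dict.empty
    (by simp [posns]) (by simp [posns])
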